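-- pv_equiv track=rewrite | github.com/cyhhao/vibe-remote | modules/im/formatters/telegram_formatter.py | _find_link_label_end
-- ===== SOURCE A (Python) =====
-- def _find_link_label_end(text: str, start: int) -> int | None:
--     for index in range(start + 1, len(text)):
--         char = text[index]
--         if char == "[":
--             return None
--         if char == "]" and index + 1 < len(text) and text[index + 1] == "(":
--             return index
--         if char == "]":
--             return None
--     return None
-- ===== SOURCE B (Python) =====
-- def _find_link_label_end(text: str, start: int) -> int | None:
--     begin = start + 1
--     close = text.find("]", begin)
--     if close == -1:
--         return None
--     opn = text.find("[", begin)
--     if opn != -1 and opn < close: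
--         return None
--     if close + 1 < len(text) and text[close + 1] == "(":
--         return close
--     return None
-- ===== Notes on version B (the rewrite author's own statement) =====
-- stated objective: idiomatic
-- what changed: A's explicit per-character loop with three early-return branches is replaced by two str.find calls (positions of the next ']' and the next '[') and a comparison of the two positions plus one lookahead test.
-- outside the precondition, e.g. on _find_link_label_end(']( ', -3): A returns 0, B returns None; on _find_link_label_end('ab', -5): A raises IndexError, B returns None
import Mathlib
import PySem

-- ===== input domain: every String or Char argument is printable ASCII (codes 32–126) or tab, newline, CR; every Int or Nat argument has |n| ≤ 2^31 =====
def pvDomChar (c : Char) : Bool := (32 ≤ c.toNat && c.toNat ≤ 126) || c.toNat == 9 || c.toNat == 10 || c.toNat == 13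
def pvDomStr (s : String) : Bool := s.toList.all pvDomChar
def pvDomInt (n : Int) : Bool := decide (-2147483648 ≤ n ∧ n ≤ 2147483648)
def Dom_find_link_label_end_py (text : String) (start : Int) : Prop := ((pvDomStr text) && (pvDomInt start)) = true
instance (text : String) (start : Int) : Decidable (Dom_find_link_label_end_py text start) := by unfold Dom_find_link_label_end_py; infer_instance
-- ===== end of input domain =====

-- B replaces A's index-by-index scanning loop with two str.find calls and a comparison of
-- the found positions (idiomatic; return-value equivalence proved for start ≥ -1).

-- ===== PORT A =====
-- A's loop 'for index in range(start + 1, len(text))' with early returns, as structural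
-- recursion on the number of remaining indices.
def goA (cs : List Char) (n : Int) : Nat → Int → Option Int
  | 0, _ => none
  | fuel + 1, index =>
    match PySem.List.pyGet? cs index with
    | none => none   -- Python raises IndexError here; such inputs are outside Pre_
    | some char =>
      if char = '[' then none
      else if char = ']' ∧ index + 1 < n ∧ PySem.List.pyGet? cs (index + 1) = some '(' then some index
      else if char = ']' then none
      else goA cs n fuel (index + 1)

def find_link_label_end_py (text : String) (start : Int) : Option Int :=
  let cs := text.toList
  let n : Int := (cs.length : Int)
  goA cs n (n - (start + 1)).toNat (start + 1)

-- ===== PORT B =====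
-- body of B after 'begin = start + 1'
def altAux (cs : List Char) (begin_ : Int) : Option Int :=
  let close := PySem.Chars.findFrom cs [']'] begin_ none
  if close = -1 then none
  else
    let opn := PySem.Chars.findFrom cs ['['] begin_ none
    if opn ≠ -1 ∧ opn < close then none
    else if close + 1 < (cs.length : Int) ∧ PySem.List.pyGet? cs (close + 1) = some '(' then some close
    else none

def find_link_label_end_py_alt (text : String) (start : Int) : Option Int :=
  altAux text.toList (start + 1)

-- ===== PRECONDITION & SPEC =====
-- Pre_ restricts start to the function's natural domain (start is the position of the
-- opening '[' of a link label, so the scan begins at start + 1 ≥ 0): for start < -1,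
-- A either raises IndexError (start + 1 < -len(text) on nonempty text) or scans through
-- Python's negative-index wraparound, while B's find-based scan clamps negative starts to 0.
def Pre_find_link_label_end_py (text : String) (start : Int) : Prop := -1 ≤ start
instance (text : String) (start : Int) : Decidable (Pre_find_link_label_end_py text start) := by
  unfold Pre_find_link_label_end_py; infer_instance

def pvWitness_find_link_label_end_py : String × Int := ("[x](y)", 0)

def Spec_find_link_label_end_py (text : String) (start : Int) (out : Option Int) : Prop :=
  out = find_link_label_end_py_alt text start
instance (text : String) (start : Int) (out : Option Int) : Decidable (Spec_find_link_label_end_py text start out) := by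
  unfold Spec_find_link_label_end_py; infer_instance

-- ===== CLAIM (what is proved, stated in full; the proofs are below) =====
def Claim_equal_find_link_label_end_py : Prop := ∀ (text : String) (start : Int), Dom_find_link_label_end_py text start → Pre_find_link_label_end_py text start → Spec_find_link_label_end_py text start (find_link_label_end_py text start)

-- ===== LEMMAS AND PROOFS =====

theorem prefix_singleton_iff (c : Char) (l : List Char) : [c] <+: l ↔ l.head? = some c := by
  constructor
  · rintro ⟨t, rfl⟩; rfl
  · intro h
    cases l with
    | nil => simp at h
    | cons x xs => cases h; exact ⟨xs, rfl⟩

theorem find_single_nil (c : Char) : PySem.Chars.find [] [c] = -1 := by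
  rw [PySem.Chars.find_eq_neg_one_iff]
  simp

-- str.find for a single-character needle unfolds over a cons cell.
theorem find_single_cons (x : Char) (t : List Char) (c : Char) :
    PySem.Chars.find (x :: t) [c] =
      if x = c then 0
      else if PySem.Chars.find t [c] = -1 then -1 else PySem.Chars.find t [c] + 1 := by
  by_cases hx : x = c
  · subst hx
    rw [if_pos rfl]
    have hin : [x] <:+: (x :: t) := by simp [List.singleton_infix_iff]
    have h0 : 0 ≤ PySem.Chars.find (x :: t) [x] := (PySem.Chars.find_nonneg_iff _ _).2 hin
    obtain ⟨hpre, hmin⟩ := PySem.Chars.find_spec h0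
    by_contra hne
    have hpos : 0 < (PySem.Chars.find (x :: t) [x]).toNat := by omega
    exact hmin 0 hpos ((prefix_singleton_iff _ _).2 rfl)
  · rw [if_neg hx]
    by_cases hm : PySem.Chars.find t [c] = -1
    · rw [if_pos hm, PySem.Chars.find_eq_neg_one_iff]
      rw [PySem.Chars.find_eq_neg_one_iff] at hm
      simp [List.singleton_infix_iff] at hm ⊢
      exact ⟨fun h => hx h.symm, hm⟩
    · rw [if_neg hm]
      have h0 : 0 ≤ PySem.Chars.find t [c] := by
        have := PySem.Chars.neg_one_le_find t [c]; omega
      obtain ⟨hpre, hmin⟩ := PySem.Chars.find_spec h0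
      have hmem : c ∈ t := by
        have : c ∈ t.drop (PySem.Chars.find t [c]).toNat := by
          rw [prefix_singleton_iff] at hpre
          exact List.mem_of_mem_head? hpre
        exact List.mem_of_mem_drop this
      have hin : [c] <:+: (x :: t) := by simp [List.singleton_infix_iff, hmem]
      have g0 : 0 ≤ PySem.Chars.find (x :: t) [c] := (PySem.Chars.find_nonneg_iff _ _).2 hin
      obtain ⟨gpre, gmin⟩ := PySem.Chars.find_spec g0
      set g := PySem.Chars.find (x :: t) [c] with hg
      set f := PySem.Chars.find t [c] with hfdef
      have g1 : 1 ≤ g.toNat := by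
        by_contra h
        have : g.toNat = 0 := by omega
        rw [this] at gpre
        rw [prefix_singleton_iff] at gpre
        simp at gpre
        exact hx gpre
      have hdrop : (x :: t).drop g.toNat = t.drop (g.toNat - 1) := by
        have : g.toNat = (g.toNat - 1) + 1 := by omega
        rw [this]; rfl
      have hle1 : f.toNat ≤ g.toNat - 1 := by
        by_contra h
        exact hmin (g.toNat - 1) (by omega) (hdrop ▸ gpre)
      have hle2 : g.toNat ≤ f.toNat + 1 := by
        by_contra h
        have hp : [c] <+: (x :: t).drop (f.toNat + 1) := by
          have : (x :: t).drop (f.toNat + 1) = t.drop f.toNat := rfl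
          rw [this]; exact hpre
        exact gmin (f.toNat + 1) (by omega) hp
      omega

-- Python's str.find returns -1 for a start position past the end of the string.
theorem findFrom_past (cs : List Char) (c : Char) (k : Int) (h : (cs.length : Int) < k) :
    PySem.Chars.findFrom cs [c] k none = -1 := by
  unfold PySem.Chars.findFrom
  have hk0 : ¬ k < 0 := by omega
  simp only [hk0, if_false]
  rw [if_pos h]

theorem findFrom_at (cs : List Char) (k : Nat) (hk : k < cs.length) (c : Char)
    (he : cs[k] = c) : PySem.Chars.findFrom cs [c] (k : Int) none = (k : Int) := by
  rw [PySem.Chars.findFrom_natCast cs [c] k (le_of_lt hk)]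
  rw [List.drop_eq_getElem_cons hk, find_single_cons, if_pos he]
  norm_num

theorem findFrom_succ (cs : List Char) (k : Nat) (hk : k < cs.length) (c : Char)
    (hne : cs[k] ≠ c) :
    PySem.Chars.findFrom cs [c] (k : Int) none = PySem.Chars.findFrom cs [c] ((k : Int) + 1) none := by
  have h1 : ((k : Int) + 1) = ((k + 1 : Nat) : Int) := by push_cast; ring
  rw [h1, PySem.Chars.findFrom_natCast cs [c] k (le_of_lt hk),
      PySem.Chars.findFrom_natCast cs [c] (k+1) hk]
  rw [List.drop_eq_getElem_cons hk, find_single_cons, if_neg hne]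
  by_cases hm : PySem.Chars.find (cs.drop (k+1)) [c] = -1
  · simp [hm]
  · have hge := PySem.Chars.neg_one_le_find (cs.drop (k+1)) [c]
    rw [if_neg hm, if_neg (by omega : ¬ PySem.Chars.find (cs.drop (k+1)) [c] + 1 = -1), if_neg hm]
    push_cast; ring

theorem main_lemma (cs : List Char) : ∀ (f k : Nat), f = cs.length - k →
    goA cs (cs.length : Int) f (k : Int) = altAux cs (k : Int) := by
  intro f
  induction f with
  | zero =>
    intro k hf
    have hk : cs.length ≤ k := by omega
    have hclose : PySem.Chars.findFrom cs [']'] (k : Int) none = -1 := by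
      rcases lt_or_eq_of_le hk with h | h
      · exact findFrom_past cs ']' (k:Int) (by exact_mod_cast h)
      · rw [← h, PySem.Chars.findFrom_natCast cs [']'] cs.length le_rfl]
        simp [List.drop_length, find_single_nil]
    simp [goA, altAux, hclose]
  | succ f ih =>
    intro k hf
    have hk : k < cs.length := by omega
    have hget : PySem.List.pyGet? cs (k : Int) = some cs[k] := by
      rw [PySem.List.pyGet?_natCast]
      exact List.getElem?_eq_getElem hk
    have hkf := PySem.Chars.findFrom_natCast cs [']'] k (le_of_lt hk)
    have hof := PySem.Chars.findFrom_natCast cs ['['] k (le_of_lt hk)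
    rw [List.drop_eq_getElem_cons hk, find_single_cons] at hkf hof
    have hge1 := PySem.Chars.neg_one_le_find (cs.drop (k+1)) [']']
    have hge2 := PySem.Chars.neg_one_le_find (cs.drop (k+1)) ['[']
    simp only [goA, hget]
    by_cases hbr : cs[k] = '['
    · have hne : ¬ cs[k] = ']' := by rw [hbr]; decide
      rw [if_pos hbr]
      simp only [if_neg hne] at hkf
      by_cases hm : PySem.Chars.find (cs.drop (k+1)) [']'] = -1
      · simp only [if_pos hm] at hkf
        simp [altAux, hkf]
      · have hm1 : ¬ PySem.Chars.find (cs.drop (k+1)) [']'] + 1 = -1 := by omega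
        simp only [if_neg hm, if_neg hm1] at hkf
        have hopn : PySem.Chars.findFrom cs ['['] (k : Int) none = (k : Int) :=
          findFrom_at cs k hk '[' hbr
        simp only [altAux, hkf, hopn]
        rw [if_neg (by omega), if_pos ⟨by omega, by omega⟩]
    · rw [if_neg hbr]
      by_cases hbc : cs[k] = ']'
      · have hclose : PySem.Chars.findFrom cs [']'] (k : Int) none = (k : Int) :=
          findFrom_at cs k hk ']' hbc
        simp only [if_neg hbr] at hof
        have hopn_cond : ¬ (PySem.Chars.findFrom cs ['['] (k : Int) none ≠ -1 ∧
            PySem.Chars.findFrom cs ['['] (k : Int) none < (k : Int)) := by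
          by_cases hm : PySem.Chars.find (cs.drop (k+1)) ['['] = -1
          · simp only [if_pos hm] at hof
            simp [hof]
          · have hm1 : ¬ PySem.Chars.find (cs.drop (k+1)) ['['] + 1 = -1 := by omega
            simp only [if_neg hm, if_neg hm1] at hof
            rw [hof]
            rintro ⟨-, hlt⟩
            omega
        simp only [altAux, hclose]
        rw [if_neg (by omega : ¬ (k:Int) = -1), if_neg hopn_cond]
        by_cases hp : (k : Int) + 1 < (cs.length : Int) ∧ PySem.List.pyGet? cs ((k : Int) + 1) = some '('
        · rw [if_pos ⟨hbc, hp⟩, if_pos hp]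
        · rw [if_neg (by tauto), if_neg hp, if_pos hbc]
      · rw [if_neg (by tauto), if_neg hbc]
        have h1 : (k : Int) + 1 = ((k + 1 : Nat) : Int) := by push_cast; ring
        have halt : altAux cs (k : Int) = altAux cs ((k : Int) + 1) := by
          simp only [altAux, findFrom_succ cs k hk ']' hbc, findFrom_succ cs k hk '[' hbr]
        rw [halt, h1]
        exact ih (k + 1) (by omega)

-- ===== VERDICT (by name: the statement is the Claim_ definition above) =====
theorem find_link_label_end_py_spec : Claim_equal_find_link_label_end_py := by
  intro text start _ hpre
  unfold Spec_find_link_label_end_py find_link_label_end_py find_link_label_end_py_alt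
  have hs : -1 ≤ start := hpre
  have hk : start + 1 = ((start + 1).toNat : Int) := by omega
  rw [hk]
  have hf : (((text.toList.length : Int)) - ((start + 1).toNat : Int)).toNat
      = text.toList.length - (start + 1).toNat := by omega
  simp only [hf]
  exact main_lemma text.toList _ _ rfl
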